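-- pv_equiv track=rewrite | github.com/paulinacwielag/studia_us | jupyter/Podstawy programowania 2020/Labs semestr drugi/numseq.py | podciagi
-- ===== SOURCE A (Python) =====
-- def podziel_na_n_elementowe_podciagi(L, n):
--     ret = []
--     for start in range(len(L) - n + 1):
--         ret.append(L[start:start+n])
--     return ret
--
-- def czy_malejacy(L):
--     for idx in range(len(L) - 1):
--         if L[idx] <= L[idx+1]:
--             return False
--     return True
--
-- def czy_staly(L):
--     for idx in range(len(L) - 1):
--         if L[idx] != L[idx+1]:
--             return False
--     return True
--
-- def czy_rosnacy(L):
--     for idx in range(len(L) - 1):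
--         if L[idx] >= L[idx+1]:
--             return False
--     return True
--
-- def podziel_na_podciagi(L, m=2):
--     """
--     Funkcja zwraca listę wszystkich podciągów ciągu L o dlugosci m=2 lub większej
--     """
--     podciagi = []
--     for dlugosc in range(m, len(L) + 1):  # 2, 3, 4, ..., n
--         podciagi.extend(podziel_na_n_elementowe_podciagi(L, dlugosc))
--     return podciagi
--
-- def podciagi(L):
--     """
--     Funkcja zwraca słownik rosnących, malejących i stałych
--     podciągów ciągu L o dlugosci 2 lub wiekszej.
--     """
--     ret = {}
--     podciagi = podziel_na_podciagi(L, 2)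
--
--     rosnace = []
--     malejace = []
--     stale = []
--     for ciag in podciagi:
--         if czy_rosnacy(ciag):
--             rosnace.append(ciag)
--         if czy_malejacy(ciag):
--             malejace.append(ciag)
--         if czy_staly(ciag):
--             stale.append(ciag)
--
--     ret['rosnace'] = rosnace
--     ret['malejace'] = malejace
--     ret['stale'] = stale
--     return ret
-- ===== SOURCE B (Python) =====
-- def podciagi(L):
--     """
--     Run-length precompute: inc/dec/eq[i] = length of the longest strictly increasing /
--     strictly decreasing / constant run ENDING at index i, so each candidate subsequence
--     is classified with an O(1) comparison instead of a rescan.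
--     """
--     n = len(L)
--     inc, dec, eq = ([1], [1], [1]) if L else ([], [], [])
--     for i in range(1, n):
--         inc.append(inc[-1] + 1 if L[i-1] < L[i] else 1)
--         dec.append(dec[-1] + 1 if L[i-1] > L[i] else 1)
--         eq.append(eq[-1] + 1 if L[i-1] == L[i] else 1)
--     ros, mal, sta = [], [], []
--     for m in range(2, n + 1):
--         for s in range(n - m + 1):
--             e = s + m - 1
--             if inc[e] >= m:
--                 ros.append(L[s:s+m])
--             if dec[e] >= m:
--                 mal.append(L[s:s+m])
--             if eq[e] >= m:
--                 sta.append(L[s:s+m])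
--     return {'rosnace': ros, 'malejace': mal, 'stale': sta}
-- ===== Notes on version B (the rewrite author's own statement) =====
-- stated objective: alternative
-- what changed: B precomputes run-length arrays (longest strictly increasing / strictly decreasing / constant run ending at each index) in one pass, so each candidate subarray is classified by a single O(1) comparison instead of being generated first and rescanned element by element; on worst-case inputs the output itself dominates the cost, so no unqualified speed claim is made.
import Mathlib
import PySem

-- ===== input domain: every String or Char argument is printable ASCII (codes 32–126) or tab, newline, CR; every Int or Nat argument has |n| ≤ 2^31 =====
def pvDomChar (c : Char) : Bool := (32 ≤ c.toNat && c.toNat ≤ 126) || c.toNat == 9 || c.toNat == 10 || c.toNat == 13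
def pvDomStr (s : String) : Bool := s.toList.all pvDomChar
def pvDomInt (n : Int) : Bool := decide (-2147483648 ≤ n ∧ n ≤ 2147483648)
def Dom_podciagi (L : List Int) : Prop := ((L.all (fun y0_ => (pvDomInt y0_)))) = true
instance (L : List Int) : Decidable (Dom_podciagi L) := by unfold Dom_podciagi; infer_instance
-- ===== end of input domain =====

-- B replaces A's generate-then-rescan classification by one pass of run-length arrays: each
-- candidate subarray is tested with a single O(1) comparison (objective: alternative).

-- ===== PORT A =====
def podzielNaNElementowePodciagi (L : List Int) (n : Int) : List (List Int) :=
  (PySem.List.pyRange 0 ((L.length : Int) - n + 1) 1).foldl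
    (fun ret start => ret ++ [PySem.List.slice L (some start) (some (start + n))]) []

-- shared loop body of czy_rosnacy / czy_malejacy / czy_staly (identical up to the comparison)
def pvCzyGo (cmp : Int → Int → Bool) (xs : List Int) : List Int → Bool
  | [] => true
  | idx :: rest =>
      if cmp (PySem.List.pyGetD xs idx 0) (PySem.List.pyGetD xs (idx + 1) 0) then false
      else pvCzyGo cmp xs rest

def czyMalejacy (xs : List Int) : Bool :=
  pvCzyGo (fun a b => decide (a ≤ b)) xs (PySem.List.pyRange 0 ((xs.length : Int) - 1) 1)

def czyStaly (xs : List Int) : Bool :=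
  pvCzyGo (fun a b => decide (a ≠ b)) xs (PySem.List.pyRange 0 ((xs.length : Int) - 1) 1)

def czyRosnacy (xs : List Int) : Bool :=
  pvCzyGo (fun a b => decide (b ≤ a)) xs (PySem.List.pyRange 0 ((xs.length : Int) - 1) 1)

def podzielNaPodciagi (L : List Int) (m : Int) : List (List Int) :=
  (PySem.List.pyRange m ((L.length : Int) + 1) 1).foldl
    (fun acc dlugosc => acc ++ podzielNaNElementowePodciagi L dlugosc) []

def podciagi (L : List Int) : List (String × List (List Int)) :=
  let subs := podzielNaPodciagi L 2
  let res := subs.foldl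
    (fun (st : List (List Int) × List (List Int) × List (List Int)) ciag =>
      (if czyRosnacy ciag then st.1 ++ [ciag] else st.1,
       if czyMalejacy ciag then st.2.1 ++ [ciag] else st.2.1,
       if czyStaly ciag then st.2.2 ++ [ciag] else st.2.2))
    ([], [], [])
  [("rosnace", res.1), ("malejace", res.2.1), ("stale", res.2.2)]

-- ===== PORT B =====
def podciagi_alt (L : List Int) : List (String × List (List Int)) :=
  let n : Int := (L.length : Int)
  let runs :=
    (PySem.List.pyRange 1 n 1).foldl
      (fun (r : List Int × List Int × List Int) i =>
        ((r.1 ++ [if PySem.List.pyGetD L (i - 1) 0 < PySem.List.pyGetD L i 0 then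
                    PySem.List.pyGetD r.1 (-1) 0 + 1 else 1]),
         (r.2.1 ++ [if PySem.List.pyGetD L i 0 < PySem.List.pyGetD L (i - 1) 0 then
                    PySem.List.pyGetD r.2.1 (-1) 0 + 1 else 1]),
         (r.2.2 ++ [if PySem.List.pyGetD L (i - 1) 0 == PySem.List.pyGetD L i 0 then
                    PySem.List.pyGetD r.2.2 (-1) 0 + 1 else 1])))
      (if L.isEmpty then ([], [], []) else ([1], [1], [1]))
  let out :=
    (PySem.List.pyRange 2 (n + 1) 1).foldl
      (fun (st : List (List Int) × List (List Int) × List (List Int)) m =>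
        (PySem.List.pyRange 0 (n - m + 1) 1).foldl
          (fun st2 s =>
            (if m ≤ PySem.List.pyGetD runs.1 (s + m - 1) 0 then
               st2.1 ++ [PySem.List.slice L (some s) (some (s + m))] else st2.1,
             if m ≤ PySem.List.pyGetD runs.2.1 (s + m - 1) 0 then
               st2.2.1 ++ [PySem.List.slice L (some s) (some (s + m))] else st2.2.1,
             if m ≤ PySem.List.pyGetD runs.2.2 (s + m - 1) 0 then
               st2.2.2 ++ [PySem.List.slice L (some s) (some (s + m))] else st2.2.2))
          st)
      ([], [], [])
  [("rosnace", out.1), ("malejace", out.2.1), ("stale", out.2.2)]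

-- ===== PRECONDITION & SPEC =====
def Spec_podciagi (L : List Int) (out : List (String × List (List Int))) : Prop := out = podciagi_alt L
instance (L : List Int) (out : List (String × List (List Int))) : Decidable (Spec_podciagi L out) := by unfold Spec_podciagi; infer_instance

-- ===== CLAIM (what is proved, stated in full; the proofs are below) =====
def Claim_equal_podciagi : Prop := ∀ (L : List Int), Dom_podciagi L → Spec_podciagi L (podciagi L)

-- ===== LEMMAS AND PROOFS =====

-- run-length spec: pvRun p L e = length of the longest run ending at index e whose adjacent
-- pairs all satisfy p
def pvRun (p : Int → Int → Bool) (L : List Int) : Nat → Nat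
  | 0 => 1
  | e + 1 => if p (L.getD e 0) (L.getD (e + 1) 0) then pvRun p L e + 1 else 1

lemma pvRun_pos (p : Int → Int → Bool) (L : List Int) (e : Nat) : 1 ≤ pvRun p L e := by
  cases e with
  | zero => simp [pvRun]
  | succ e => simp only [pvRun]; split <;> omega

lemma pvRun_le (p : Int → Int → Bool) (L : List Int) : ∀ e : Nat, pvRun p L e ≤ e + 1 := by
  intro e
  induction e with
  | zero => simp [pvRun]
  | succ e ih => simp only [pvRun]; split <;> omega

lemma pvRun_le_iff (p : Int → Int → Bool) (L : List Int) :
    ∀ (e m : Nat), (m ≤ pvRun p L e ↔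
      (m ≤ e + 1 ∧ ∀ i : Nat, e + 1 - m ≤ i → i < e → p (L.getD i 0) (L.getD (i + 1) 0) = true)) := by
  intro e
  induction e with
  | zero =>
      intro m
      constructor
      · intro hm
        exact ⟨by simpa [pvRun] using hm, fun i _ hi => absurd hi (Nat.not_lt_zero i)⟩
      · intro ⟨hm, _⟩; simpa [pvRun] using hm
  | succ e ih =>
      intro m
      have hpos := pvRun_pos p L e
      have hle := pvRun_le p L e
      by_cases hp : p (L.getD e 0) (L.getD (e + 1) 0) = true
      · have hrepr : pvRun p L (e + 1) = pvRun p L e + 1 := by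
          simp only [pvRun]; rw [if_pos hp]
        rw [hrepr]
        constructor
        · intro hm
          refine ⟨by omega, fun i h2 h3 => ?_⟩
          rcases Nat.lt_or_ge i e with hie | hie
          · exact ((ih (m - 1)).mp (by omega)).2 i (by omega) hie
          · have hieq : i = e := by omega
            subst hieq; exact hp
        · intro ⟨h2, h3⟩
          by_cases hm1 : m ≤ 1
          · omega
          · have := (ih (m - 1)).mpr ⟨by omega, fun i ha hb => h3 i (by omega) (by omega)⟩
            omega
      · simp only [Bool.not_eq_true] at hp
        have hrepr : pvRun p L (e + 1) = 1 := by
          simp only [pvRun]; rw [if_neg (by rw [hp]; exact Bool.false_ne_true)]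
        rw [hrepr]
        constructor
        · intro hm
          exact ⟨by omega, fun i h2 h3 => by omega⟩
        · intro ⟨h2, h3⟩
          by_contra hm
          have := h3 e (by omega) (by omega)
          rw [this] at hp; exact absurd hp (by decide)

-- the run-array fold of port B (one component, generic in the adjacent-pair test)
lemma pvRunFold_eq (cond : Int → Int → Bool) (L : List Int) :
    ∀ (k : Nat), 1 ≤ k →
      (PySem.List.pyRange 1 (k : Int) 1).foldl
        (fun acc i => acc ++ [if cond (PySem.List.pyGetD L (i - 1) 0) (PySem.List.pyGetD L i 0) = true then
            PySem.List.pyGetD acc (-1) 0 + 1 else 1]) [1] =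
      (List.range k).map (fun e => (pvRun cond L e : Int)) := by
  intro k hk
  induction k, hk using Nat.le_induction with
  | base =>
      rw [PySem.List.pyRange_one_eq_nil (by norm_num)]
      simp [pvRun]
  | succ k hk ih =>
      have hcast : ((k + 1 : Nat) : Int) = (k : Int) + 1 := by push_cast; ring
      rw [hcast, PySem.List.pyRange_one_succ_right (by exact_mod_cast hk), List.foldl_append, ih]
      simp only [List.foldl_cons, List.foldl_nil]
      have hne : (List.range k).map (fun e => (pvRun cond L e : Int)) ≠ [] := by
        simp; omega
      rw [PySem.List.pyGetD_neg_one _ _ hne]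
      have hlast : ((List.range k).map (fun e => (pvRun cond L e : Int))).getLast hne =
          (pvRun cond L (k - 1) : Int) := by
        rw [List.getLast_eq_getElem]
        simp only [List.getElem_map, List.length_map, List.length_range, List.getElem_range]
      have hidx : ((k : Int) - 1) = ((k - 1 : Nat) : Int) := by omega
      rw [hlast, hidx, PySem.List.pyGetD_natCast, PySem.List.pyGetD_natCast]
      rw [List.range_succ, List.map_append, List.map_cons, List.map_nil]
      congr 1
      have hk1 : k = (k - 1) + 1 := by omega
      rw [hk1]
      simp only [pvRun]
      rw [← hk1]
      rcases hcond : cond (L.getD (k - 1) 0) (L.getD k 0) <;> push_cast <;> simp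

lemma pvCzyGo_eq_true_iff (cmp : Int → Int → Bool) (xs : List Int) :
    ∀ r : List Int, (pvCzyGo cmp xs r = true ↔
      ∀ idx ∈ r, cmp (PySem.List.pyGetD xs idx 0) (PySem.List.pyGetD xs (idx + 1) 0) = false) := by
  intro r
  induction r with
  | nil => simp [pvCzyGo]
  | cons idx rest ih =>
      by_cases hc : cmp (PySem.List.pyGetD xs idx 0) (PySem.List.pyGetD xs (idx + 1) 0) = true
      · simp only [pvCzyGo, hc, if_true]
        constructor
        · intro h; exact absurd h (by decide)
        · intro h
          have := h idx (List.mem_cons_self)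
          rw [hc] at this; exact absurd this (by decide)
      · simp only [Bool.not_eq_true] at hc
        simp only [pvCzyGo, hc, List.mem_cons]
        rw [if_neg (by decide), ih]
        constructor
        · intro h i hi
          rcases hi with rfl | hi
          · exact hc
          · exact h i hi
        · intro h i hi; exact h i (Or.inr hi)

-- elements and length of the slice L[s:s+m]
lemma pvSlice_eq (L : List Int) (s m : Nat) :
    PySem.List.slice L (some (s : Int)) (some ((s : Int) + (m : Int))) = (L.drop s).take m :=
  PySem.List.slice_natCast_add L s m

lemma pvSlice_len (L : List Int) (s m : Nat) (h : s + m ≤ L.length) :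
    ((L.drop s).take m).length = m := by
  simp [List.length_take, List.length_drop]; omega

lemma pvSlice_getD (L : List Int) (s m i : Nat) (h : s + m ≤ L.length) (hi : i < m) :
    ((L.drop s).take m).getD i 0 = L.getD (s + i) 0 := by
  have h1 : i < ((L.drop s).take m).length := by rw [pvSlice_len L s m h]; exact hi
  have h2 : s + i < L.length := by omega
  rw [List.getD_eq_getElem _ _ h1, List.getD_eq_getElem _ _ h2]
  simp [List.getElem_take, List.getElem_drop]

-- the heart: A's rescan test on the slice L[s:s+m] equals B's O(1) run-length comparison
lemma pvClass_iff (cmp p : Int → Int → Bool)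
    (hcp : ∀ a b, cmp a b = false ↔ p a b = true)
    (L : List Int) (s m : Nat) (hm : 2 ≤ m) (h : s + m ≤ L.length) :
    (pvCzyGo cmp ((L.drop s).take m)
        (PySem.List.pyRange 0 ((((L.drop s).take m).length : Int) - 1) 1) = true) ↔
      m ≤ pvRun p L (s + m - 1) := by
  have hlen : ((L.drop s).take m).length = m := pvSlice_len L s m h
  rw [pvCzyGo_eq_true_iff, pvRun_le_iff]
  constructor
  · intro hA
    refine ⟨by omega, fun i h1 h2 => ?_⟩
    have hji : i = s + (i - s) := by omega
    set j := i - s with hj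
    have hjm : j + 1 < m := by omega
    have hidx : (j : Int) ∈ PySem.List.pyRange 0 ((((L.drop s).take m).length : Int) - 1) 1 := by
      rw [PySem.List.mem_pyRange_one, hlen]
      omega
    have hmem := hA (j : Int) hidx
    have hc1 : ((j : Int) + 1) = ((j + 1 : Nat) : Int) := by push_cast; ring
    rw [hc1] at hmem
    simp only [PySem.List.pyGetD_natCast] at hmem
    rw [pvSlice_getD L s m j h (by omega), pvSlice_getD L s m (j + 1) h (by omega)] at hmem
    have hsj : s + (j + 1) = s + j + 1 := by omega
    rw [hsj] at hmem
    rw [hji]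
    exact (hcp _ _).mp hmem
  · intro ⟨_, hB⟩ idx hidx
    rw [PySem.List.mem_pyRange_one, hlen] at hidx
    obtain ⟨h0, hlt⟩ := hidx
    have hji : idx = (idx.toNat : Int) := by omega
    set j := idx.toNat with hj
    have hjm : j + 1 < m := by omega
    rw [hji]
    have hc1 : ((j : Int) + 1) = ((j + 1 : Nat) : Int) := by push_cast; ring
    rw [hc1]
    simp only [PySem.List.pyGetD_natCast]
    rw [pvSlice_getD L s m j h (by omega), pvSlice_getD L s m (j + 1) h (by omega)]
    have hsj : s + (j + 1) = s + j + 1 := by omega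
    rw [hsj]
    exact (hcp _ _).mpr (hB (s + j) (by omega) (by omega))

-- abbreviations for the normal forms of the two programs
def pvSlc (L : List Int) (m : Int) : Int → List Int :=
  fun s => PySem.List.slice L (some s) (some (s + m))

def pvArr (p : Int → Int → Bool) (L : List Int) : List Int :=
  (List.range L.length).map (fun e => (pvRun p L e : Int))

lemma pvArr_def (p : Int → Int → Bool) (L : List Int) :
    (List.range L.length).map (fun e => (pvRun p L e : Int)) = pvArr p L := rfl

-- A's classification loop, split into three independent filters
lemma pvClassifyFold (cz1 cz2 cz3 : List Int → Bool) :
    ∀ (l : List (List Int)) (a b c : List (List Int)),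
      l.foldl (fun st ciag =>
          (if cz1 ciag then st.1 ++ [ciag] else st.1,
           if cz2 ciag then st.2.1 ++ [ciag] else st.2.1,
           if cz3 ciag then st.2.2 ++ [ciag] else st.2.2)) (a, b, c) =
        (a ++ l.filter cz1, b ++ l.filter cz2, c ++ l.filter cz3) := by
  intro l
  induction l with
  | nil => intro a b c; simp
  | cons x xs ih =>
      intro a b c
      simp only [List.foldl_cons]
      rw [ih]
      simp only [List.filter_cons]
      refine Prod.ext ?_ (Prod.ext ?_ ?_) <;> · dsimp only; split <;> simp

-- B's run-building loop, split into three independent folds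
lemma pvRunsTriple (L : List Int) :
    ∀ (l : List Int) (a b c : List Int),
      l.foldl (fun r i =>
          (r.1 ++ [if PySem.List.pyGetD L (i - 1) 0 < PySem.List.pyGetD L i 0 then
                     PySem.List.pyGetD r.1 (-1) 0 + 1 else 1],
           r.2.1 ++ [if PySem.List.pyGetD L i 0 < PySem.List.pyGetD L (i - 1) 0 then
                     PySem.List.pyGetD r.2.1 (-1) 0 + 1 else 1],
           r.2.2 ++ [if PySem.List.pyGetD L (i - 1) 0 == PySem.List.pyGetD L i 0 then
                     PySem.List.pyGetD r.2.2 (-1) 0 + 1 else 1])) (a, b, c) =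
        (l.foldl (fun acc i => acc ++ [if PySem.List.pyGetD L (i - 1) 0 < PySem.List.pyGetD L i 0 then
             PySem.List.pyGetD acc (-1) 0 + 1 else 1]) a,
         l.foldl (fun acc i => acc ++ [if PySem.List.pyGetD L i 0 < PySem.List.pyGetD L (i - 1) 0 then
             PySem.List.pyGetD acc (-1) 0 + 1 else 1]) b,
         l.foldl (fun acc i => acc ++ [if PySem.List.pyGetD L (i - 1) 0 == PySem.List.pyGetD L i 0 then
             PySem.List.pyGetD acc (-1) 0 + 1 else 1]) c) := by
  intro l
  induction l with
  | nil => intro a b c; rfl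
  | cons x xs ih => intro a b c; simp only [List.foldl_cons]; rw [ih]

-- B's inner emission loop, split into three independent filtered emissions
lemma pvInnerFold (L : List Int) (arr1 arr2 arr3 : List Int) (m : Int) :
    ∀ (r : List Int) (a b c : List (List Int)),
      r.foldl (fun st2 s =>
          (if m ≤ PySem.List.pyGetD arr1 (s + m - 1) 0 then
             st2.1 ++ [PySem.List.slice L (some s) (some (s + m))] else st2.1,
           if m ≤ PySem.List.pyGetD arr2 (s + m - 1) 0 then
             st2.2.1 ++ [PySem.List.slice L (some s) (some (s + m))] else st2.2.1,
           if m ≤ PySem.List.pyGetD arr3 (s + m - 1) 0 then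
             st2.2.2 ++ [PySem.List.slice L (some s) (some (s + m))] else st2.2.2)) (a, b, c) =
        (a ++ (r.filter (fun s => decide (m ≤ PySem.List.pyGetD arr1 (s + m - 1) 0))).map (pvSlc L m),
         b ++ (r.filter (fun s => decide (m ≤ PySem.List.pyGetD arr2 (s + m - 1) 0))).map (pvSlc L m),
         c ++ (r.filter (fun s => decide (m ≤ PySem.List.pyGetD arr3 (s + m - 1) 0))).map (pvSlc L m)) := by
  intro r
  induction r with
  | nil => intro a b c; simp
  | cons x xs ih =>
      intro a b c
      simp only [List.foldl_cons]
      rw [ih]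
      simp only [List.filter_cons]
      refine Prod.ext ?_ (Prod.ext ?_ ?_) <;>
        · dsimp only
          by_cases hx : m ≤ PySem.List.pyGetD arr1 (x + m - 1) 0 <;>
          by_cases hy : m ≤ PySem.List.pyGetD arr2 (x + m - 1) 0 <;>
          by_cases hz : m ≤ PySem.List.pyGetD arr3 (x + m - 1) 0 <;>
            simp [hx, hy, hz, pvSlc]

-- B's outer loop over lengths concatenates the per-length blocks
lemma pvOuterFold {α : Type} (B1 B2 B3 : Int → List α) :
    ∀ (l : List Int) (a b c : List α),
      l.foldl (fun st mm => (st.1 ++ B1 mm, st.2.1 ++ B2 mm, st.2.2 ++ B3 mm)) (a, b, c) =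
        (a ++ l.flatMap B1, b ++ l.flatMap B2, c ++ l.flatMap B3) := by
  intro l
  induction l with
  | nil => intro a b c; simp
  | cons x xs ih => intro a b c; simp only [List.foldl_cons]; rw [ih]; simp

-- normal form of port A
lemma pvA_eq (L : List Int) :
    podciagi L =
      [("rosnace", ((PySem.List.pyRange 2 ((L.length : Int) + 1) 1).flatMap (fun dl =>
          (PySem.List.pyRange 0 ((L.length : Int) - dl + 1) 1).map (pvSlc L dl))).filter czyRosnacy),
       ("malejace", ((PySem.List.pyRange 2 ((L.length : Int) + 1) 1).flatMap (fun dl =>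
          (PySem.List.pyRange 0 ((L.length : Int) - dl + 1) 1).map (pvSlc L dl))).filter czyMalejacy),
       ("stale", ((PySem.List.pyRange 2 ((L.length : Int) + 1) 1).flatMap (fun dl =>
          (PySem.List.pyRange 0 ((L.length : Int) - dl + 1) 1).map (pvSlc L dl))).filter czyStaly)] := by
  unfold podciagi podzielNaPodciagi podzielNaNElementowePodciagi
  simp only [PySem.List.foldl_append_singleton_eq_map, List.nil_append]
  rw [show (fun (acc : List (List Int)) dlugosc =>
        acc ++ (PySem.List.pyRange 0 ((L.length : Int) - dlugosc + 1) 1).map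
          (fun start => PySem.List.slice L (some start) (some (start + dlugosc)))) =
      (fun acc dlugosc => acc ++ (PySem.List.pyRange 0 ((L.length : Int) - dlugosc + 1) 1).map
          (pvSlc L dlugosc)) from rfl]
  rw [PySem.List.foldl_append_eq_flatMap, List.nil_append]
  rw [pvClassifyFold]
  simp

-- normal form of port B (nonempty input)
lemma pvB_eq (L : List Int) (hL : L ≠ []) :
    podciagi_alt L =
      [("rosnace", (PySem.List.pyRange 2 ((L.length : Int) + 1) 1).flatMap (fun m =>
          ((PySem.List.pyRange 0 ((L.length : Int) - m + 1) 1).filter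
            (fun s => decide (m ≤ PySem.List.pyGetD (pvArr (fun a b => decide (a < b)) L) (s + m - 1) 0))).map (pvSlc L m))),
       ("malejace", (PySem.List.pyRange 2 ((L.length : Int) + 1) 1).flatMap (fun m =>
          ((PySem.List.pyRange 0 ((L.length : Int) - m + 1) 1).filter
            (fun s => decide (m ≤ PySem.List.pyGetD (pvArr (fun a b => decide (b < a)) L) (s + m - 1) 0))).map (pvSlc L m))),
       ("stale", (PySem.List.pyRange 2 ((L.length : Int) + 1) 1).flatMap (fun m =>
          ((PySem.List.pyRange 0 ((L.length : Int) - m + 1) 1).filter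
            (fun s => decide (m ≤ PySem.List.pyGetD (pvArr (fun a b => a == b) L) (s + m - 1) 0))).map (pvSlc L m)))] := by
  have hlen : 1 ≤ L.length := by
    cases L with
    | nil => exact absurd rfl hL
    | cons x xs => simp
  have hEmp : L.isEmpty = false := by simp [hL]
  unfold podciagi_alt
  simp only [hEmp, Bool.false_eq_true, if_false]
  rw [pvRunsTriple]
  have h1 := pvRunFold_eq (fun a b => decide (a < b)) L L.length hlen
  have h2 := pvRunFold_eq (fun a b => decide (b < a)) L L.length hlen
  have h3 := pvRunFold_eq (fun a b => a == b) L L.length hlen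
  simp only [decide_eq_true_eq] at h1 h2 h3
  rw [h1, h2, h3]
  rw [pvArr_def, pvArr_def, pvArr_def]
  dsimp only
  rw [show (fun (st : List (List Int) × List (List Int) × List (List Int)) (m : Int) =>
      (PySem.List.pyRange 0 ((L.length : Int) - m + 1) 1).foldl
        (fun st2 s =>
          (if m ≤ PySem.List.pyGetD (pvArr (fun a b => decide (a < b)) L) (s + m - 1) 0 then
             st2.1 ++ [PySem.List.slice L (some s) (some (s + m))] else st2.1,
           if m ≤ PySem.List.pyGetD (pvArr (fun a b => decide (b < a)) L) (s + m - 1) 0 then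
             st2.2.1 ++ [PySem.List.slice L (some s) (some (s + m))] else st2.2.1,
           if m ≤ PySem.List.pyGetD (pvArr (fun a b => a == b) L) (s + m - 1) 0 then
             st2.2.2 ++ [PySem.List.slice L (some s) (some (s + m))] else st2.2.2)) st) =
    (fun st m =>
      (st.1 ++ ((PySem.List.pyRange 0 ((L.length : Int) - m + 1) 1).filter
          (fun s => decide (m ≤ PySem.List.pyGetD (pvArr (fun a b => decide (a < b)) L) (s + m - 1) 0))).map (pvSlc L m),
       st.2.1 ++ ((PySem.List.pyRange 0 ((L.length : Int) - m + 1) 1).filter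
          (fun s => decide (m ≤ PySem.List.pyGetD (pvArr (fun a b => decide (b < a)) L) (s + m - 1) 0))).map (pvSlc L m),
       st.2.2 ++ ((PySem.List.pyRange 0 ((L.length : Int) - m + 1) 1).filter
          (fun s => decide (m ≤ PySem.List.pyGetD (pvArr (fun a b => a == b) L) (s + m - 1) 0))).map (pvSlc L m))) from by
    funext st m
    obtain ⟨a, b, c⟩ := st
    exact pvInnerFold L _ _ _ m _ a b c]
  rw [pvOuterFold]
  simp

-- the pointwise Bool equality of the two membership tests, for one class
lemma pvPointwise (cmp p : Int → Int → Bool)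
    (hcp : ∀ a b, cmp a b = false ↔ p a b = true)
    (L : List Int) (m s : Int) (hm : 2 ≤ m) (hs : 0 ≤ s) (hsm : s + m ≤ (L.length : Int)) :
    pvCzyGo cmp (pvSlc L m s)
        (PySem.List.pyRange 0 (((pvSlc L m s).length : Int) - 1) 1) =
      decide (m ≤ PySem.List.pyGetD (pvArr p L) (s + m - 1) 0) := by
  have hsN : s = ((s.toNat : Nat) : Int) := by omega
  have hmN : m = ((m.toNat : Nat) : Int) := by omega
  set sN := s.toNat with hsdef
  set mN := m.toNat with hmdef
  have hb : sN + mN ≤ L.length := by omega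
  have hm2 : 2 ≤ mN := by omega
  have hslice : pvSlc L m s = (L.drop sN).take mN := by
    rw [pvSlc, hsN, hmN]; exact pvSlice_eq L sN mN
  have hidx : s + m - 1 = (((sN + mN - 1 : Nat)) : Int) := by omega
  have harr : PySem.List.pyGetD (pvArr p L) (s + m - 1) 0 = (pvRun p L (sN + mN - 1) : Int) := by
    rw [hidx, PySem.List.pyGetD_natCast, pvArr]
    have hlt : sN + mN - 1 < L.length := by omega
    rw [List.getD_eq_getElem _ _ (by simpa using hlt)]
    simp
  rw [hslice, harr]
  rw [Bool.eq_iff_iff]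
  rw [decide_eq_true_iff]
  have := pvClass_iff cmp p hcp L sN mN hm2 hb
  rw [this, hmN]
  exact_mod_cast Iff.rfl

-- ===== VERDICT (by name: the statement is the Claim_ definition above) =====
theorem podciagi_spec : Claim_equal_podciagi := by
  intro L _
  unfold Spec_podciagi
  by_cases hL : L = []
  · subst hL; decide
  · rw [pvA_eq L, pvB_eq L hL]
    have key : ∀ (cmp p : Int → Int → Bool), (∀ a b, cmp a b = false ↔ p a b = true) →
        ((PySem.List.pyRange 2 ((L.length : Int) + 1) 1).flatMap (fun dl =>
          (PySem.List.pyRange 0 ((L.length : Int) - dl + 1) 1).map (pvSlc L dl))).filter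
            (fun xs => pvCzyGo cmp xs (PySem.List.pyRange 0 ((xs.length : Int) - 1) 1)) =
        (PySem.List.pyRange 2 ((L.length : Int) + 1) 1).flatMap (fun m =>
          ((PySem.List.pyRange 0 ((L.length : Int) - m + 1) 1).filter
            (fun s => decide (m ≤ PySem.List.pyGetD (pvArr p L) (s + m - 1) 0))).map (pvSlc L m)) := by
      intro cmp p hcp
      rw [List.filter_flatMap]
      refine List.flatMap_congr (fun m hm => ?_)
      rw [PySem.List.mem_pyRange_one] at hm
      rw [List.filter_map]
      congr 1
      refine List.filter_congr (fun s hs => ?_)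
      rw [PySem.List.mem_pyRange_one] at hs
      exact pvPointwise cmp p hcp L m s (by omega) (by omega) (by omega)
    have hros := key (fun a b => decide (b ≤ a)) (fun a b => decide (a < b))
      (by intro a b; rw [decide_eq_false_iff_not, decide_eq_true_iff]; exact not_le)
    have hmal := key (fun a b => decide (a ≤ b)) (fun a b => decide (b < a))
      (by intro a b; rw [decide_eq_false_iff_not, decide_eq_true_iff]; exact not_le)
    have hsta := key (fun a b => decide (a ≠ b)) (fun a b => a == b)
      (by intro a b; rw [decide_eq_false_iff_not, beq_iff_eq]; exact not_not)
    simp only [List.cons.injEq, Prod.mk.injEq]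
    exact ⟨⟨trivial, hros⟩, ⟨trivial, hmal⟩, ⟨trivial, hsta⟩, trivial⟩
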